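-- pv_equiv track=rewrite | github.com/jagar028055/Market_News_Project | src/content/template_selector.py | _count_relevant_articles
-- ===== SOURCE A (Python) =====
-- from typing import Dict, Any, List, Optional
--
-- def _count_relevant_articles(
--     articles: List[Dict[str, Any]], conditions: Dict[str, Any]
-- ) -> int:
--     """関連記事数をカウント"""
--     relevant_count = 0
--
--     # 全てのキーワードを統合
--     all_keywords = []
--     for key in [
--         "keywords",
--         "fed_keywords",
--         "central_bank_keywords",
--         "earnings_keywords",
--         "geopolitical_keywords",
--         "crypto_symbols",
--     ]:
--         if key in conditions:
--             all_keywords.extend(conditions[key])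
--
--     for article in articles:
--         title = article.get("title", "").lower()
--         summary = article.get("summary", "").lower()
--         text = f"{title} {summary}"
--
--         if any(keyword.lower() in text for keyword in all_keywords):
--             relevant_count += 1
--
--     return relevant_count
-- ===== SOURCE B (Python) =====
-- from typing import Dict, Any, List
--
-- _KEYS = (
--     "keywords",
--     "fed_keywords",
--     "central_bank_keywords",
--     "earnings_keywords",
--     "geopolitical_keywords",
--     "crypto_symbols",
-- )
--
--
-- def _count_relevant_articles(
--     articles: List[Dict[str, Any]], conditions: Dict[str, Any]
-- ) -> int:
--     # Inverted loop nesting: keyword-major scan over a boolean match-mask,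
--     # instead of A's article-major scan with an inner any() over all keywords.
--     keywords = [kw.lower() for key in _KEYS for kw in conditions.get(key, [])]
--     texts = [
--         a.get("title", "").lower() + " " + a.get("summary", "").lower()
--         for a in articles
--     ]
--     matched = [False] * len(texts)
--     for kw in keywords:
--         matched = [m or (kw in t) for m, t in zip(matched, texts)]
--     return sum(matched)
-- ===== Notes on version B (the rewrite author's own statement) =====
-- stated objective: alternative
-- what changed: B inverts the loop nesting: it precomputes each article's lowercased text once, then scans keyword-by-keyword, OR-ing hits into a boolean match mask over all articles, and returns the number of True entries; A scans article-by-article with an inner any() over every keyword, lowercasing keywords per article.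
import Mathlib
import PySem

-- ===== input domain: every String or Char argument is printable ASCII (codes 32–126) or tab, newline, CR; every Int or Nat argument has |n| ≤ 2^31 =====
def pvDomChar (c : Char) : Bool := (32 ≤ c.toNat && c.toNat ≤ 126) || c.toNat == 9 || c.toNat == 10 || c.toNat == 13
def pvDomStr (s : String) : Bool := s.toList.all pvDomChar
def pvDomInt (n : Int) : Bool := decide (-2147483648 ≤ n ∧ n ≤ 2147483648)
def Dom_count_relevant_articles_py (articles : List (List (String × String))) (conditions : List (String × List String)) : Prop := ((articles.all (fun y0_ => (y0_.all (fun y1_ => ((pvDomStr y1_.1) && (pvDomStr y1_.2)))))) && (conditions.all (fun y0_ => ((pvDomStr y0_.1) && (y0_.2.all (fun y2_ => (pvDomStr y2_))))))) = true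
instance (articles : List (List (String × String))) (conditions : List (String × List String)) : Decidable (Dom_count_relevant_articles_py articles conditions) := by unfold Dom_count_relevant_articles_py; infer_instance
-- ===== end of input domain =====

-- B inverts the loop nesting: keyword-major scan OR-ing hits into a boolean mask over
-- precomputed lowercased article texts, instead of A's article-major any()-over-keywords loop;
-- same return value on every input.

def pvKeys : List String :=
  ["keywords", "fed_keywords", "central_bank_keywords", "earnings_keywords",
   "geopolitical_keywords", "crypto_symbols"]

-- ===== PORT A =====
def count_relevant_articles_py (articles : List (List (String × String))) (conditions : List (String × List String)) : Int :=
  let cond : PySem.Dict String (List String) := PySem.Dict.mk conditions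
  let all_keywords : List String :=
    pvKeys.foldl (fun acc key =>
      if cond.contains key then acc ++ (cond.get? key).getD [] else acc) []
  articles.foldl (fun relevant_count article =>
    let a : PySem.Dict String String := PySem.Dict.mk article
    let title := PySem.Str.lower (a.getD "title" "")
    let summary := PySem.Str.lower (a.getD "summary" "")
    let text := title ++ " " ++ summary
    if all_keywords.any (fun keyword => PySem.Str.isIn (PySem.Str.lower keyword) text) then
      relevant_count + 1
    else
      relevant_count) 0

-- ===== PORT B =====
def count_relevant_articles_py_alt (articles : List (List (String × String))) (conditions : List (String × List String)) : Int :=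
  let cond : PySem.Dict String (List String) := PySem.Dict.mk conditions
  let keywords : List String := pvKeys.flatMap (fun key => (cond.getD key []).map PySem.Str.lower)
  let texts : List String := articles.map (fun article =>
    let a : PySem.Dict String String := PySem.Dict.mk article
    PySem.Str.lower (a.getD "title" "") ++ " " ++ PySem.Str.lower (a.getD "summary" ""))
  let matched : List Bool :=
    keywords.foldl (fun m kw => List.zipWith (fun b t => b || PySem.Str.isIn kw t) m texts)
      (texts.map (fun _ => false))
  ((matched.countP id : Nat) : Int)

-- ===== PRECONDITION & SPEC =====
def Spec_count_relevant_articles_py (articles : List (List (String × String))) (conditions : List (String × List String)) (out : Int) : Prop := out = count_relevant_articles_py_alt articles conditions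
instance (articles : List (List (String × String))) (conditions : List (String × List String)) (out : Int) : Decidable (Spec_count_relevant_articles_py articles conditions out) := by unfold Spec_count_relevant_articles_py; infer_instance

-- ===== CLAIM (what is proved, stated in full; the proofs are below) =====
def Claim_equal_count_relevant_articles_py : Prop := ∀ (articles : List (List (String × String))) (conditions : List (String × List String)), Dom_count_relevant_articles_py articles conditions → Spec_count_relevant_articles_py articles conditions (count_relevant_articles_py articles conditions)

-- ===== LEMMAS AND PROOFS =====

-- A's guarded-extend loop over the key list builds exactly the flat list of conditions.get(key, []).
theorem keywords_eq (cond : PySem.Dict String (List String)) :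
    ∀ (keys : List String) (acc : List String),
      keys.foldl (fun acc key =>
        if cond.contains key then acc ++ (cond.get? key).getD [] else acc) acc
      = acc ++ keys.flatMap (fun key => cond.getD key []) := by
  intro keys
  induction keys with
  | nil => intro acc; simp
  | cons k ks ih =>
    intro acc
    simp only [List.foldl_cons, List.flatMap_cons, ih]
    rw [PySem.Dict.getD_eq_get?_getD]
    by_cases h : cond.contains k = true
    · simp [h, List.append_assoc]
    · have hn : cond.get? k = none := by
        rw [PySem.Dict.get?_eq_none_iff_contains]
        simpa using h
      simp [h, hn]

-- A's counter-accumulator loop is a countP.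
theorem count_loop_eq (p : List (String × String) → Bool) :
    ∀ (l : List (List (String × String))) (c : Int),
      l.foldl (fun cnt a => if p a then cnt + 1 else cnt) c = c + (l.countP p : Nat) := by
  intro l
  induction l with
  | nil => intro c; simp
  | cons x xs ih =>
    intro c
    by_cases h : p x = true
    · simp [h, ih]; ring
    · simp [h, ih]

-- zipWith against the same right list composes pointwise.
theorem zipWith_zipWith_same {α β γ δ : Type} (f : γ → β → δ) (g : α → β → γ) :
    ∀ (as : List α) (bs : List β),
      List.zipWith f (List.zipWith g as bs) bs = List.zipWith (fun a b => f (g a b) b) as bs := by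
  intro as
  induction as with
  | nil => intro bs; simp
  | cons a as ih =>
    intro bs
    cases bs with
    | nil => simp
    | cons b bs => simp [ih]

-- B's keyword-major mask loop computes, pointwise, "old bit OR some keyword occurs".
theorem mask_loop_eq (ts : List String) :
    ∀ (kws : List String) (m : List Bool), m.length ≤ ts.length →
      kws.foldl (fun m kw => List.zipWith (fun b t => b || PySem.Str.isIn kw t) m ts) m
      = List.zipWith (fun b t => b || kws.any (fun kw => PySem.Str.isIn kw t)) m ts := by
  intro kws
  induction kws with
  | nil =>
    intro m hm
    induction m generalizing ts with
    | nil => simp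
    | cons b bs ih =>
      cases ts with
      | nil => simp at hm
      | cons t ts => simpa using ih ts (by simpa using hm)
  | cons kw kws ih =>
    intro m hm
    have hlen : (List.zipWith (fun b t => b || PySem.Str.isIn kw t) m ts).length ≤ ts.length := by
      simp [List.length_zipWith]
    simp only [List.foldl_cons, ih _ hlen, zipWith_zipWith_same]
    congr 1
    funext b t
    simp [Bool.or_assoc]

-- ===== VERDICT (by name: the statement is the Claim_ definition above) =====
theorem count_relevant_articles_py_spec : Claim_equal_count_relevant_articles_py := by
  intro articles conditions hdom
  clear hdom
  unfold Spec_count_relevant_articles_py count_relevant_articles_py count_relevant_articles_py_alt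
  simp only [keywords_eq, List.nil_append, count_loop_eq, zero_add]
  rw [mask_loop_eq _ _ _ (by simp)]
  congr 1
  induction articles with
  | nil => simp
  | cons a arts ih =>
    simp only [List.map_cons, List.zipWith_cons_cons, List.countP_cons, ih]
    congr 1
    simp [List.any_map, List.any_flatMap]
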